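-- pv_equiv track=rewrite | github.com/Pongchi/TIL | CodingTest/STUDY/간식을 먹자.py | solution
-- ===== SOURCE A (Python) =====
-- def solution(limit_seconds):
--     Foods = {300:10, 130:30, 120:20, 20:30}
--     result = 0
--
--     for food in Foods:
--         while limit_seconds >= food:
--             if Foods[food] > 0:
--                 result += 1
--                 limit_seconds -= food
--                 Foods[food] -= 1
--             else:
--                 break
--
--     return result
-- ===== SOURCE B (Python) =====
-- def solution(limit_seconds):
--     Foods = {300: 10, 130: 30, 120: 20, 20: 30}
--     result = 0
--     for food, count in Foods.items():
--         n = min(count, max(0, limit_seconds // food))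
--         result += n
--         limit_seconds -= n * food
--     return result
-- ===== Notes on version B (the rewrite author's own statement) =====
-- stated objective: simpler
-- what changed: Replaces the one-snack-at-a-time inner while loop (with a mutated stock dict) by a single arithmetic step per food: take n = min(count, max(0, limit // food)) snacks at once.
import Mathlib
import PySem

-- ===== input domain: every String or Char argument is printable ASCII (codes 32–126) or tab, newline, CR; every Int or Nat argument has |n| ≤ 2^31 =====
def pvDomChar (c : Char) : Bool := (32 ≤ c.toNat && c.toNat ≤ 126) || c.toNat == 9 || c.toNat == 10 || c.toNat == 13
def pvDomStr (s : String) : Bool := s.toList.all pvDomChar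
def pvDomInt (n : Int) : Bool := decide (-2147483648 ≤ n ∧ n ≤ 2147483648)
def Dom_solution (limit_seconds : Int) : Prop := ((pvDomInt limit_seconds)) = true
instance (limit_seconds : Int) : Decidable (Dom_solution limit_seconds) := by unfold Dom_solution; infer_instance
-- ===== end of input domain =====

-- B replaces A's one-snack-at-a-time inner while loop by one arithmetic step per food; objective: simpler.

-- ===== PORT A =====
-- A's inner 'while limit >= food: if Foods[food] > 0: …, else break'; the stock Foods[food]
-- is only read and written inside its own key's iteration, so it is carried here as the
-- per-food counter 'stock' (a Nat: the dict values are the nonnegative literals 10,30,20,30,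
-- decremented only while positive). Recursion is on 'stock', which strictly decreases.
def loopA (food : Int) (stock : Nat) (limit result : Int) : Int × Int :=
  if food ≤ limit then
    match stock with
    | Nat.succ s => loopA food s (limit - food) (result + 1)
    | 0 => (limit, result)   -- Foods[food] > 0 fails: break
  else (limit, result)

-- for food in Foods, in the dict's insertion order
def solution (limit_seconds : Int) : Int :=
  let s1 := loopA 300 10 limit_seconds 0
  let s2 := loopA 130 30 s1.1 s1.2
  let s3 := loopA 120 20 s2.1 s2.2
  let s4 := loopA 20 30 s3.1 s3.2
  s4.2

-- ===== PORT B =====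
-- one step of B's for loop: state = (limit_seconds, result), item = (food, count)
def stepB (st : Int × Int) (fc : Int × Int) : Int × Int :=
  let n := min fc.2 (max 0 (PySem.Int.floordiv st.1 fc.1))
  (st.1 - n * fc.1, st.2 + n)

def solution_alt (limit_seconds : Int) : Int :=
  ([((300:Int), (10:Int)), (130, 30), (120, 20), (20, 30)].foldl stepB (limit_seconds, 0)).2

-- ===== PRECONDITION & SPEC =====
def Spec_solution (limit_seconds : Int) (out : Int) : Prop := out = solution_alt limit_seconds
instance (limit_seconds : Int) (out : Int) : Decidable (Spec_solution limit_seconds out) := by unfold Spec_solution; infer_instance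

-- ===== CLAIM (what is proved, stated in full; the proofs are below) =====
def Claim_equal_solution : Prop := ∀ (limit_seconds : Int), Dom_solution limit_seconds → Spec_solution limit_seconds (solution limit_seconds)

-- ===== LEMMAS AND PROOFS =====

-- A's inner while loop computes exactly B's arithmetic step.
theorem loopA_eq_stepB (food : Int) (hf : 0 < food) (stock : Nat) (limit result : Int) :
    loopA food stock limit result = stepB (limit, result) (food, (stock : Int)) := by
  induction stock generalizing limit result with
  | zero =>
    have hge : max 0 (PySem.Int.floordiv limit food) ≥ 0 := le_max_left _ _
    have hmin : min (0:Int) (max 0 (PySem.Int.floordiv limit food)) = 0 := by omega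
    simp only [loopA, stepB, Nat.cast_zero, hmin]
    split_ifs <;> simp
  | succ s ih =>
    simp only [loopA]
    by_cases h : food ≤ limit
    · simp only [if_pos h, ih]
      simp only [stepB]
      have h1 : (1:Int) ≤ PySem.Int.floordiv limit food := by
        rw [PySem.Int.le_floordiv_iff_mul_le hf]; omega
      have h2 : PySem.Int.floordiv (limit - food) food = PySem.Int.floordiv limit food - 1 := by
        rw [PySem.Int.floordiv_eq_iff_of_pos hf]
        have h3 := PySem.Int.floordiv_mul_add_mod limit food
        have h4 : 0 ≤ PySem.Int.mod limit food := PySem.Int.mod_nonneg _ hf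
        have h5 : PySem.Int.mod limit food < food := PySem.Int.mod_lt _ hf
        constructor <;> nlinarith
      simp only [h2]
      set d := PySem.Int.floordiv limit food with hd
      have hn : min ((s:Int) + 1) (max 0 d) = min (s:Int) (max 0 (d - 1)) + 1 := by omega
      push_cast
      rw [hn, Prod.mk.injEq]
      constructor <;> ring
    · simp only [if_neg h, stepB]
      have h1 : PySem.Int.floordiv limit food < 1 := by
        rw [PySem.Int.floordiv_lt_iff_lt_mul hf]; omega
      have hmin : min ((s:Int)+1) (max 0 (PySem.Int.floordiv limit food)) = 0 := by
        have : (0:Int) ≤ (s:Int) + 1 := by positivity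
        omega
      push_cast
      simp [hmin]

-- ===== VERDICT (by name: the statement is the Claim_ definition above) =====
theorem solution_spec : Claim_equal_solution := by
  intro limit _
  unfold Spec_solution solution solution_alt
  simp only [List.foldl]
  rw [loopA_eq_stepB 300 (by norm_num), loopA_eq_stepB 130 (by norm_num),
      loopA_eq_stepB 120 (by norm_num), loopA_eq_stepB 20 (by norm_num)]
  norm_num
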